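-- pv_equiv track=rewrite | github.com/haolunc/ARC-RL | reference_solutions/solutions/d037b0a7.py | transform
-- ===== SOURCE A (Python) =====
-- def transform(grid):
--     if not grid:
--         return grid
--     n = len(grid)
--     m = len(grid[0])
--     out = [row[:] for row in grid]
--     for j in range(m):
--         for i in range(n):
--             val = grid[i][j]
--             if val != 0:
--                 for r in range(i, n):
--                     out[r][j] = val
--     return out
-- ===== SOURCE B (Python) =====
-- def transform(grid):
--     if not grid:
--         return grid
--     m = len(grid[0])
--     carry = [0] * m
--     out = []
--     for row in grid:
--         new = row[:]
--         for j in range(m):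
--             if row[j] != 0:
--                 carry[j] = row[j]
--             elif carry[j] != 0:
--                 new[j] = carry[j]
--         out.append(new)
--     return out
-- ===== Notes on version B (the rewrite author's own statement) =====
-- stated objective: faster
-- what changed: A, for every nonzero cell of a column, rewrites the whole column segment below it (O(n^2) per column); B makes a single top-down pass over the rows carrying, per column, the last nonzero value seen and writing it into zero cells.
import Mathlib
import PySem

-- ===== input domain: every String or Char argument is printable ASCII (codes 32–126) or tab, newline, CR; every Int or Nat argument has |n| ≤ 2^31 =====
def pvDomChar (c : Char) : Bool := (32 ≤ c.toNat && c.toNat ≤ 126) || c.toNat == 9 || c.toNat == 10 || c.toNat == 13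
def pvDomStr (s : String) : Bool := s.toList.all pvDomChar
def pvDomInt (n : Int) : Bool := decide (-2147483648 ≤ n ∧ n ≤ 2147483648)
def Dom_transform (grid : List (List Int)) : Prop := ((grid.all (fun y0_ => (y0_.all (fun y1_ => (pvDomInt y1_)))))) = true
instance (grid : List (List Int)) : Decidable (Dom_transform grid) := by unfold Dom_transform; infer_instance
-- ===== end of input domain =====

-- B replaces A's per-column quadratic fill (for every nonzero cell, overwrite the whole column
-- below it) by ONE top-down pass keeping, per column, the last nonzero value seen (objective: faster).

-- ===== PORT A =====
-- inner loop 'for r in range(i, n): out[r][j] = val' — indices are in range under Pre_transform,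
-- so List.getD/List.set are exact for Python's (raising) indexing there
def fillA (j : Nat) (val : Int) (out : List (List Int)) (i k : Nat) : List (List Int) :=
  (List.range' i k).foldl (fun out r => out.set r ((out.getD r []).set j val)) out

-- middle loop 'for i in range(n): …' for one column j
def colA (grid : List (List Int)) (n j : Nat) (out : List (List Int)) : List (List Int) :=
  (List.range n).foldl (fun out i =>
    let val := (grid.getD i []).getD j 0
    if val ≠ 0 then fillA j val out i (n - i) else out) out

def transform (grid : List (List Int)) : List (List Int) :=
  if grid.isEmpty then grid
  else
    (List.range (grid.headD []).length).foldl
      (fun out j => colA grid grid.length j out) grid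

-- ===== PORT B =====
-- 'for j in range(m): if row[j] != 0: carry[j] = row[j] elif carry[j] != 0: new[j] = carry[j]'
def altRow (m : Nat) (row : List Int) (p0 : List Int × List Int) : List Int × List Int :=
  (List.range m).foldl (fun p j =>
    if row.getD j 0 ≠ 0 then (p.1, p.2.set j (row.getD j 0))
    else if p.2.getD j 0 ≠ 0 then (p.1.set j (p.2.getD j 0), p.2)
    else p) p0

-- 'for row in grid: new = row[:]; …; out.append(new)' with the carry threaded through
def altGo (m : Nat) (carry : List Int) : List (List Int) → List (List Int)
  | [] => []
  | row :: rest =>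
    let p := altRow m row (row, carry)
    p.1 :: altGo m p.2 rest

def transform_alt (grid : List (List Int)) : List (List Int) :=
  if grid.isEmpty then grid
  else altGo (grid.headD []).length (List.replicate (grid.headD []).length 0) grid

-- ===== PRECONDITION & SPEC =====
-- Pre_ excludes exactly the inputs where Python A raises IndexError: some row shorter than the
-- first row (grid[i][j] with j < len(grid[0]) out of range); B raises there too.
def Pre_transform (grid : List (List Int)) : Prop :=
  ∀ row ∈ grid, (grid.headD []).length ≤ row.length
instance (grid : List (List Int)) : Decidable (Pre_transform grid) := by
  unfold Pre_transform; infer_instance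

def pvWitness_transform : List (List Int) := [[1, 0, 0], [0, 0, 2], [0, 0, 0]]

def Spec_transform (grid : List (List Int)) (out : List (List Int)) : Prop := out = transform_alt grid
instance (grid : List (List Int)) (out : List (List Int)) : Decidable (Spec_transform grid out) := by
  unfold Spec_transform; infer_instance

-- ===== CLAIM (what is proved, stated in full; the proofs are below) =====
def Claim_equal_transform : Prop := ∀ (grid : List (List Int)), Dom_transform grid → Pre_transform grid → Spec_transform grid (transform grid)

-- ===== LEMMAS AND PROOFS =====

-- last nonzero of column j among rows L (read from grid), starting from v
def colAcc (grid : List (List Int)) (j : Nat) (v : Int) (L : List Nat) : Int :=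
  L.foldl (fun acc i => if (grid.getD i []).getD j 0 ≠ 0 then (grid.getD i []).getD j 0 else acc) v

-- value of the output cell (r, j) (for j below the first row's width)
def G (grid : List (List Int)) (r j : Nat) : Int :=
  colAcc grid j ((grid.getD r []).getD j 0) (List.range (r + 1))

-- carry of column j after processing rows 0..r-1
def C (grid : List (List Int)) (r j : Nat) : Int := colAcc grid j 0 (List.range r)

lemma colAcc_cons (grid : List (List Int)) (j : Nat) (v : Int) (i : Nat) (L : List Nat) :
    colAcc grid j v (i :: L) =
      colAcc grid j (if (grid.getD i []).getD j 0 ≠ 0 then (grid.getD i []).getD j 0 else v) L := by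
  rw [colAcc, List.foldl_cons]; rfl

lemma colAcc_append_single (grid : List (List Int)) (j : Nat) (v : Int) (L : List Nat) (r : Nat) :
    colAcc grid j v (L ++ [r]) =
      if (grid.getD r []).getD j 0 ≠ 0 then (grid.getD r []).getD j 0 else colAcc grid j v L := by
  rw [colAcc, List.foldl_append, List.foldl_cons, List.foldl_nil]; rfl

lemma colAcc_init (grid : List (List Int)) (j : Nat) (L : List Nat) :
    ∀ v, colAcc grid j v L = if colAcc grid j 0 L ≠ 0 then colAcc grid j 0 L else v := by
  induction L with
  | nil => intro v; simp [colAcc]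
  | cons i L ih =>
    intro v
    rw [colAcc_cons, colAcc_cons]
    by_cases h : (grid.getD i []).getD j 0 ≠ 0
    · rw [if_pos h, if_pos h]
      have hne : colAcc grid j ((grid.getD i []).getD j 0) L ≠ 0 := by
        rw [ih]
        split_ifs with h2
        · exact h2
        · exact h
      rw [if_pos hne]
    · rw [if_neg h, if_neg h]; exact ih v

lemma C_succ (grid : List (List Int)) (r j : Nat) :
    C grid (r + 1) j = if (grid.getD r []).getD j 0 ≠ 0 then (grid.getD r []).getD j 0 else C grid r j := by
  rw [C, List.range_succ, colAcc_append_single, ← C]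

lemma G_eq (grid : List (List Int)) (r j : Nat) :
    G grid r j = if (grid.getD r []).getD j 0 ≠ 0 then (grid.getD r []).getD j 0
      else if C grid r j ≠ 0 then C grid r j else (grid.getD r []).getD j 0 := by
  rw [G, List.range_succ, colAcc_append_single,
    colAcc_init grid j (List.range r), ← C]

lemma fillA_length (j : Nat) (val : Int) (i k : Nat) (out : List (List Int)) :
    (fillA j val out i k).length = out.length := by
  induction k generalizing i out with
  | zero => simp [fillA]
  | succ k ih =>
    rw [fillA, List.range'_succ, List.foldl_cons]
    rw [← fillA]
    rw [ih]
    simp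

lemma getD_set_list (out : List (List Int)) (i r' : Nat) (x : List Int) :
    (out.set i x).getD r' [] = if i = r' ∧ i < out.length then x else out.getD r' [] := by
  simp only [List.getD, List.getElem?_set]
  by_cases h1 : i = r'
  · subst h1
    by_cases h2 : i < out.length
    · simp [h2]
    · simp [h2]
  · simp [h1]

lemma fillA_getD (j : Nat) (val : Int) :
    ∀ (k i : Nat) (out : List (List Int)) (r' : Nat),
      (fillA j val out i k).getD r' [] =
        if i ≤ r' ∧ r' < i + k ∧ r' < out.length then (out.getD r' []).set j val
        else out.getD r' [] := by
  intro k
  induction k with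
  | zero => intro i out r'; simp [fillA]; omega
  | succ k ih =>
    intro i out r'
    rw [fillA, List.range'_succ, List.foldl_cons, ← fillA]
    rw [ih]
    simp only [List.length_set]
    rw [getD_set_list]
    split_ifs <;> first
      | rfl | omega
      | (simp_all)

-- per-row view of A's column pass
def rowA (grid : List (List Int)) (j r' : Nat) (row : List Int) (L : List Nat) : List Int :=
  L.foldl (fun row i =>
    if (grid.getD i []).getD j 0 ≠ 0 ∧ i ≤ r' then row.set j ((grid.getD i []).getD j 0) else row) row

lemma rowA_cons (grid : List (List Int)) (j r' : Nat) (i : Nat) (L : List Nat) (row : List Int) :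
    rowA grid j r' row (i :: L) =
      rowA grid j r'
        (if (grid.getD i []).getD j 0 ≠ 0 ∧ i ≤ r' then row.set j ((grid.getD i []).getD j 0) else row)
        L := by
  rw [rowA, List.foldl_cons]; rfl

lemma rowA_length (grid : List (List Int)) (j r' : Nat) (L : List Nat) :
    ∀ row, (rowA grid j r' row L).length = row.length := by
  induction L with
  | nil => intro row; rfl
  | cons i L ih =>
    intro row
    rw [rowA_cons, ih]
    split_ifs <;> simp

lemma rowA_getD_ne (grid : List (List Int)) (j r' : Nat) (L : List Nat) :
    ∀ row (j' : Nat), j' ≠ j → (rowA grid j r' row L).getD j' 0 = row.getD j' 0 := by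
  induction L with
  | nil => intro row j' _; rfl
  | cons i L ih =>
    intro row j' hne
    rw [rowA_cons, ih _ _ hne]
    split_ifs with h
    · rw [List.getD, List.getD, List.getElem?_set_ne (by omega)]; rfl
    · rfl

lemma rowA_drop (grid : List (List Int)) (j r' : Nat) :
    ∀ (L : List Nat) row, (∀ i ∈ L, r' < i) → rowA grid j r' row L = row := by
  intro L
  induction L with
  | nil => intro row _; rfl
  | cons i L ih =>
    intro row h
    rw [rowA_cons, if_neg (by have := h i (by simp); omega), ih]
    intro x hx; exact h x (by simp [hx])

lemma rowA_getD_self (grid : List (List Int)) (j r' : Nat) :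
    ∀ (L : List Nat) row, (∀ i ∈ L, i ≤ r') → j < row.length →
      (rowA grid j r' row L).getD j 0 = colAcc grid j (row.getD j 0) L := by
  intro L
  induction L with
  | nil => intro row _ _; rfl
  | cons i L ih =>
    intro row h hj
    rw [rowA_cons, colAcc_cons]
    by_cases hg : (grid.getD i []).getD j 0 ≠ 0
    · rw [if_pos ⟨hg, h i (by simp)⟩, if_pos hg,
        ih _ (fun x hx => h x (by simp [hx])) (by simp [hj])]
      congr 1
      rw [List.getD, List.getElem?_set_self' ]
      simp [hj]
    · rw [if_neg (by tauto), if_neg hg,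
        ih _ (fun x hx => h x (by simp [hx])) hj]

lemma colA_foldl_getD (grid : List (List Int)) (n j : Nat) :
    ∀ (L : List Nat) (out : List (List Int)), out.length = n → (∀ i ∈ L, i < n) →
      ∀ r' < n,
        ((L.foldl (fun out i =>
            let val := (grid.getD i []).getD j 0
            if val ≠ 0 then fillA j val out i (n - i) else out) out).getD r' []) =
          rowA grid j r' (out.getD r' []) L := by
  intro L
  induction L with
  | nil => intro out _ _ r' _; rfl
  | cons i L ih =>
    intro out hlen hmem r' hr'
    rw [List.foldl_cons, rowA_cons]
    dsimp only
    by_cases hg : (grid.getD i []).getD j 0 ≠ 0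
    · rw [if_pos hg]
      have hi : i < n := hmem i (by simp)
      have h1 : (fillA j ((grid.getD i []).getD j 0) out i (n - i)).length = n := by
        rw [fillA_length, hlen]
      rw [ih _ h1 (fun x hx => hmem x (by simp [hx])) r' hr']
      rw [fillA_getD, hlen]
      have : (i ≤ r' ∧ r' < i + (n - i) ∧ r' < n) ↔ (i ≤ r') := by omega
      rw [if_congr this rfl rfl]
      congr 1
      by_cases hle : i ≤ r'
      · rw [if_pos hle, if_pos ⟨hg, hle⟩]
      · rw [if_neg hle, if_neg (by tauto)]
    · rw [if_neg hg, if_neg (by tauto)]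
      exact ih _ hlen (fun x hx => hmem x (by simp [hx])) r' hr' 

lemma colA_foldl_length (grid : List (List Int)) (n j : Nat) :
    ∀ (L : List Nat) (out : List (List Int)),
      (L.foldl (fun out i =>
          let val := (grid.getD i []).getD j 0
          if val ≠ 0 then fillA j val out i (n - i) else out) out).length = out.length := by
  intro L
  induction L with
  | nil => intro out; rfl
  | cons i L ih =>
    intro out
    rw [List.foldl_cons, ih]
    dsimp only
    split_ifs <;> simp [fillA_length]

lemma rowA_append (grid : List (List Int)) (j r' : Nat) (L1 L2 : List Nat) (row : List Int) :
    rowA grid j r' row (L1 ++ L2) = rowA grid j r' (rowA grid j r' row L1) L2 := by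
  rw [rowA, List.foldl_append]; rfl

lemma rowA_range_trunc (grid : List (List Int)) (j r' n : Nat) (hr : r' < n) (row : List Int) :
    rowA grid j r' row (List.range n) = rowA grid j r' row (List.range (r' + 1)) := by
  have hn : n = (r' + 1) + (n - (r' + 1)) := by omega
  rw [hn, List.range_add, rowA_append, rowA_drop]
  intro x hx
  obtain ⟨k, _, rfl⟩ := List.mem_map.mp hx
  omega

-- invariant for A's outer loop over columns
def InvA (grid : List (List Int)) (S : List Nat) (out : List (List Int)) : Prop :=
  out.length = grid.length ∧
  (∀ r < grid.length, (out.getD r []).length = (grid.getD r []).length) ∧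
  (∀ r < grid.length, ∀ j' : Nat,
      (out.getD r []).getD j' 0 =
        if j' ∈ S then G grid r j' else (grid.getD r []).getD j' 0)

lemma outerA (grid : List (List Int)) (hPre : Pre_transform grid) :
    ∀ (L S : List Nat) (out : List (List Int)),
      (∀ x ∈ L, x < (grid.headD []).length ∧ x ∉ S) → L.Nodup → InvA grid S out →
      InvA grid (S ++ L) (L.foldl (fun out j => colA grid grid.length j out) out) := by
  intro L
  induction L with
  | nil => intro S out _ _ hinv; simpa using hinv
  | cons jx L ih =>
    intro S out hmem hnodup hinv
    obtain ⟨hjm, hjS⟩ := hmem jx (by simp)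
    obtain ⟨hl, hrl, hent⟩ := hinv
    rw [List.foldl_cons]
    have hrows : ∀ r < grid.length,
        (colA grid grid.length jx out).getD r [] = rowA grid jx r (out.getD r []) (List.range grid.length) := by
      intro r hr
      exact colA_foldl_getD grid grid.length jx (List.range grid.length) out hl
        (fun x hx => List.mem_range.mp hx) r hr
    have hinv1 : InvA grid (S ++ [jx]) (colA grid grid.length jx out) := by
      refine ⟨?_, ?_, ?_⟩
      · rw [colA, colA_foldl_length, hl]
      · intro r hr
        rw [hrows r hr, rowA_length, hrl r hr]
      · intro r hr j'
        by_cases hj : j' = jx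
        · subst hj
          rw [hrows r hr, rowA_range_trunc grid j' r grid.length hr,
            rowA_getD_self grid j' r (List.range (r + 1)) (out.getD r [])
              (fun x hx => by have := List.mem_range.mp hx; omega)
              (by rw [hrl r hr]
                  have hmem2 : grid.getD r [] ∈ grid := by
                    rw [List.getD_eq_getElem _ _ hr]; exact List.getElem_mem hr
                  have := hPre _ hmem2
                  omega)]
          rw [hent r hr j', if_neg hjS, if_pos (by simp)]
          rfl
        · rw [hrows r hr, rowA_getD_ne grid jx r (List.range grid.length) _ _ hj,
            hent r hr j']
          have : (j' ∈ S ++ [jx]) ↔ (j' ∈ S) := by simp [hj]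
          rw [if_congr this rfl rfl]
    have := ih (S ++ [jx]) (colA grid grid.length jx out)
      (fun x hx => ⟨(hmem x (by simp [hx])).1,
        by
          have h1 := (hmem x (by simp [hx])).2
          have h2 : x ≠ jx := by
            intro h; subst h
            exact (List.nodup_cons.mp hnodup).1 hx
          simp [h1, h2]⟩)
      (List.nodup_cons.mp hnodup).2 hinv1
    rwa [List.append_assoc, List.singleton_append] at this

lemma InvA_nil (grid : List (List Int)) : InvA grid [] grid := by
  refine ⟨rfl, fun r _ => rfl, fun r _ j' => ?_⟩
  rw [if_neg (by simp)]

lemma transform_char (grid : List (List Int)) (hPre : Pre_transform grid) :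
    InvA grid (List.range (grid.headD []).length) (transform grid) := by
  rw [transform]
  by_cases h : grid.isEmpty
  · rw [if_pos h]
    have : grid = [] := List.isEmpty_iff.mp h
    subst this
    exact ⟨rfl, fun r hr => by simp at hr, fun r hr => by simp at hr⟩
  · rw [if_neg h]
    have := outerA grid hPre (List.range (grid.headD []).length) [] grid
      (fun x hx => ⟨List.mem_range.mp hx, by simp⟩) (List.nodup_range) (InvA_nil grid)
    rwa [List.nil_append] at this

-- B-side
def altRowL (row : List Int) (L : List Nat) (p0 : List Int × List Int) : List Int × List Int :=
  L.foldl (fun p j =>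
    if row.getD j 0 ≠ 0 then (p.1, p.2.set j (row.getD j 0))
    else if p.2.getD j 0 ≠ 0 then (p.1.set j (p.2.getD j 0), p.2)
    else p) p0

lemma altRow_eq_altRowL (m : Nat) (row : List Int) (p0 : List Int × List Int) :
    altRow m row p0 = altRowL row (List.range m) p0 := rfl

lemma getD_set_int (xs : List Int) (i j : Nat) (v : Int) :
    (xs.set i v).getD j 0 = if i = j ∧ i < xs.length then v else xs.getD j 0 := by
  simp only [List.getD, List.getElem?_set]
  by_cases h1 : i = j
  · subst h1
    by_cases h2 : i < xs.length
    · simp [h2]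
    · simp [h2]
  · simp [h1]

lemma altRowL_fold (row : List Int) :
    ∀ (L : List Nat) (new0 carry0 : List Int), L.Nodup →
      (altRowL row L (new0, carry0)).1.length = new0.length ∧
      (altRowL row L (new0, carry0)).2.length = carry0.length ∧
      (∀ j' : Nat,
        (altRowL row L (new0, carry0)).1.getD j' 0 =
          if j' ∈ L ∧ row.getD j' 0 = 0 ∧ carry0.getD j' 0 ≠ 0 ∧ j' < new0.length
          then carry0.getD j' 0 else new0.getD j' 0) ∧
      (∀ j' : Nat,
        (altRowL row L (new0, carry0)).2.getD j' 0 =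
          if j' ∈ L ∧ row.getD j' 0 ≠ 0 ∧ j' < carry0.length
          then row.getD j' 0 else carry0.getD j' 0) := by
  intro L
  induction L with
  | nil =>
    intro new0 carry0 _
    exact ⟨rfl, rfl, fun j' => by simp [altRowL], fun j' => by simp [altRowL]⟩
  | cons jx L ih =>
    intro new0 carry0 hnodup
    obtain ⟨hjx, hnd⟩ := List.nodup_cons.mp hnodup
    have hstep : ∀ p0, altRowL row (jx :: L) p0 =
        altRowL row L (if row.getD jx 0 ≠ 0 then (p0.1, p0.2.set jx (row.getD jx 0))
          else if p0.2.getD jx 0 ≠ 0 then (p0.1.set jx (p0.2.getD jx 0), p0.2)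
          else p0) := by
      intro p0; rw [altRowL, List.foldl_cons]; rfl
    by_cases hg : row.getD jx 0 ≠ 0
    · rw [hstep, if_pos hg]
      obtain ⟨l1, l2, e1, e2⟩ := ih new0 (carry0.set jx (row.getD jx 0)) hnd
      refine ⟨l1, by rw [l2]; simp, ?_, ?_⟩
      · intro j'
        rw [e1 j']
        by_cases hj : j' = jx
        · subst hj
          rw [if_neg (by tauto), if_neg (by tauto)]
        · rw [getD_set_int,
            if_neg (show ¬(jx = j' ∧ jx < carry0.length) from by tauto)]
          exact if_congr (by simp [hj]) rfl rfl
      · intro j'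
        rw [e2 j', List.length_set, getD_set_int]
        by_cases hj : j' = jx
        · subst hj
          rw [if_neg (by tauto)]
          by_cases hlt : j' < carry0.length
          · rw [if_pos ⟨rfl, hlt⟩, if_pos ⟨by simp, hg, hlt⟩]
          · rw [if_neg (by tauto), if_neg (by tauto)]
        · rw [if_neg (show ¬(jx = j' ∧ jx < carry0.length) from by tauto),
            if_congr (show (j' ∈ jx :: L ∧ row.getD j' 0 ≠ 0 ∧ j' < carry0.length) ↔
              (j' ∈ L ∧ row.getD j' 0 ≠ 0 ∧ j' < carry0.length) from by simp [hj]) rfl rfl]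
    · by_cases hc : carry0.getD jx 0 ≠ 0
      · rw [hstep, if_neg hg, if_pos hc]
        obtain ⟨l1, l2, e1, e2⟩ := ih (new0.set jx (carry0.getD jx 0)) carry0 hnd
        refine ⟨by rw [l1]; simp, l2, ?_, ?_⟩
        · intro j'
          rw [e1 j', List.length_set, getD_set_int]
          by_cases hj : j' = jx
          · subst hj
            rw [if_neg (by tauto)]
            by_cases hlt : j' < new0.length
            · rw [if_pos ⟨rfl, hlt⟩,
                if_pos ⟨by simp, by simpa using hg, hc, hlt⟩]
            · rw [if_neg (by tauto), if_neg (by tauto)]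
          · rw [if_neg (show ¬(jx = j' ∧ jx < new0.length) from by tauto)]
            exact if_congr (by simp [hj]) rfl rfl
        · intro j'
          rw [e2 j']
          by_cases hj : j' = jx
          · subst hj
            rw [if_neg (by tauto), if_neg (by tauto)]
          · exact if_congr (by simp [hj]) rfl rfl
      · rw [hstep, if_neg hg, if_neg hc]
        obtain ⟨l1, l2, e1, e2⟩ := ih new0 carry0 hnd
        refine ⟨l1, l2, ?_, ?_⟩
        · intro j'
          rw [e1 j']
          by_cases hj : j' = jx
          · subst hj
            rw [if_neg (by tauto), if_neg (by tauto)]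
          · exact if_congr (by simp [hj]) rfl rfl
        · intro j'
          rw [e2 j']
          by_cases hj : j' = jx
          · subst hj
            rw [if_neg (by tauto), if_neg (by tauto)]
          · exact if_congr (by simp [hj]) rfl rfl

lemma altGo_char (grid : List (List Int)) (hPre : Pre_transform grid) :
    ∀ (rows : List (List Int)) (r : Nat) (carry : List Int),
      rows = grid.drop r → carry.length = (grid.headD []).length →
      (∀ j < (grid.headD []).length, carry.getD j 0 = C grid r j) →
      (altGo (grid.headD []).length carry rows).length = rows.length ∧
      (∀ t < rows.length,
        ((altGo (grid.headD []).length carry rows).getD t []).length = (grid.getD (r + t) []).length ∧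
        (∀ j' : Nat,
          ((altGo (grid.headD []).length carry rows).getD t []).getD j' 0 =
            if j' ∈ List.range (grid.headD []).length then G grid (r + t) j'
            else (grid.getD (r + t) []).getD j' 0)) := by
  intro rows
  induction rows with
  | nil => intro r carry _ _ _; exact ⟨rfl, fun t ht => by simp at ht⟩
  | cons row rest ih =>
    intro r carry hdrop hclen hcval
    have hr : r < grid.length := by
      by_contra hge
      rw [List.drop_eq_nil_of_le (by omega)] at hdrop
      exact absurd hdrop (by simp)
    have hrowopt : grid[r]? = some row := by
      have h0 : (grid.drop r)[0]? = grid[r + 0]? := List.getElem?_drop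
      rw [← hdrop] at h0
      simpa using h0.symm
    have hrow : grid.getD r [] = row := by simp [List.getD, hrowopt]
    have hrest : rest = grid.drop (r + 1) := by
      have h1 : (grid.drop r).tail = grid.drop (r + 1) := List.tail_drop
      rw [← h1, ← hdrop]
      rfl
    have hrowmem : row ∈ grid := by
      rw [← hrow, List.getD_eq_getElem _ _ hr]
      exact List.getElem_mem hr
    have hmlen : (grid.headD []).length ≤ row.length := hPre row hrowmem
    obtain ⟨l1, l2, e1, e2⟩ :=
      altRowL_fold row (List.range (grid.headD []).length) row carry List.nodup_range
    have hunfold : altGo (grid.headD []).length carry (row :: rest) =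
        (altRow (grid.headD []).length row (row, carry)).1 ::
          altGo (grid.headD []).length (altRow (grid.headD []).length row (row, carry)).2 rest := rfl
    have hcar' : ∀ j < (grid.headD []).length,
        (altRow (grid.headD []).length row (row, carry)).2.getD j 0 = C grid (r + 1) j := by
      intro j hj
      rw [altRow_eq_altRowL, e2 j]
      by_cases hg : row.getD j 0 ≠ 0
      · rw [if_pos ⟨List.mem_range.mpr hj, hg, by omega⟩, C_succ, hrow, if_pos hg]
      · rw [if_neg (by tauto), C_succ, hrow, if_neg hg, hcval j hj]
    have hih := ih (r + 1) (altRow (grid.headD []).length row (row, carry)).2 hrest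
      (by rw [altRow_eq_altRowL, l2, hclen]) hcar'
    refine ⟨?_, ?_⟩
    · rw [hunfold, List.length_cons, hih.1, List.length_cons]
    · intro t ht
      rw [hunfold]
      cases t with
      | zero =>
        refine ⟨?_, ?_⟩
        · rw [List.getD_cons_zero, altRow_eq_altRowL, l1, Nat.add_zero, hrow]
        · intro j'
          rw [List.getD_cons_zero, altRow_eq_altRowL, e1 j', Nat.add_zero]
          by_cases hj : j' ∈ List.range (grid.headD []).length
          · have hjm : j' < (grid.headD []).length := List.mem_range.mp hj
            rw [if_pos hj]
            by_cases hg : row.getD j' 0 = 0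
            · by_cases hc : C grid r j' ≠ 0
              · rw [if_pos ⟨hj, hg, by rw [hcval j' hjm]; exact hc, by omega⟩,
                  hcval j' hjm, G_eq, hrow, if_neg (not_not_intro hg), if_pos hc]
              · rw [if_neg (show ¬(j' ∈ List.range (grid.headD []).length ∧
                    row.getD j' 0 = 0 ∧ carry.getD j' 0 ≠ 0 ∧ j' < row.length) from by
                      rw [hcval j' hjm]; tauto),
                  G_eq, hrow, if_neg (not_not_intro hg), if_neg hc]
            · rw [if_neg (show ¬(j' ∈ List.range (grid.headD []).length ∧
                  row.getD j' 0 = 0 ∧ carry.getD j' 0 ≠ 0 ∧ j' < row.length) from by tauto),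
                G_eq, hrow, if_pos (by simpa using hg)]
          · rw [if_neg (by tauto), if_neg hj, hrow]
      | succ t =>
        have ht' : t < rest.length := by simpa using ht
        have hres := hih.2 t ht'
        have harith : r + 1 + t = r + (t + 1) := by omega
        rw [harith] at hres
        simpa [List.getD_cons_succ] using hres

lemma transform_alt_char (grid : List (List Int)) (hPre : Pre_transform grid) :
    InvA grid (List.range (grid.headD []).length) (transform_alt grid) := by
  rw [transform_alt]
  by_cases h : grid.isEmpty
  · rw [if_pos h]
    have : grid = [] := List.isEmpty_iff.mp h
    subst this
    exact ⟨rfl, fun r hr => by simp at hr, fun r hr => by simp at hr⟩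
  · rw [if_neg h]
    have h0 : ∀ j < (grid.headD []).length,
        (List.replicate (grid.headD []).length (0 : Int)).getD j 0 = C grid 0 j := by
      intro j hj
      rw [List.getD, List.getElem?_replicate, if_pos hj]
      rfl
    have hch := altGo_char grid hPre grid 0
      (List.replicate (grid.headD []).length 0) (by simp) (by simp) h0
    refine ⟨hch.1, fun r hr => ?_, fun r hr j' => ?_⟩
    · have := (hch.2 r hr).1
      rwa [Nat.zero_add] at this
    · have := (hch.2 r hr).2 j'
      rwa [Nat.zero_add] at this

lemma eq_of_char (grid : List (List Int)) (S : List Nat) (a b : List (List Int))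
    (ha : InvA grid S a) (hb : InvA grid S b) : a = b := by
  obtain ⟨la, ra, ea⟩ := ha
  obtain ⟨lb, rb, eb⟩ := hb
  apply List.ext_getElem (by rw [la, lb])
  intro r h1 h2
  have hr : r < grid.length := by rw [← la]; exact h1
  have hag : a[r] = a.getD r [] := (List.getD_eq_getElem a [] h1).symm
  have hbg : b[r] = b.getD r [] := (List.getD_eq_getElem b [] h2).symm
  apply List.ext_getElem (by rw [hag, hbg, ra r hr, rb r hr])
  intro j hj1 hj2
  have h3 : (a.getD r []).getD j 0 = a[r][j] := by
    rw [← hag]; exact List.getD_eq_getElem _ _ hj1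
  have h4 : (b.getD r []).getD j 0 = b[r][j] := by
    rw [← hbg]; exact List.getD_eq_getElem _ _ hj2
  rw [← h3, ← h4, ea r hr j, eb r hr j]

-- ===== VERDICT (by name: the statement is the Claim_ definition above) =====
theorem transform_spec : Claim_equal_transform := by
  intro grid _hdom hpre
  unfold Spec_transform
  exact eq_of_char grid _ _ _ (transform_char grid hpre) (transform_alt_char grid hpre)
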